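-- pv_equiv track=rewrite | github.com/daniel-reich/ubiquitous-fiesta | SHdu4GwBQehhDm4xT_12.py | freed_prisoners
-- ===== SOURCE A (Python) =====
-- def freed_prisoners(prison):
--   count = 0
--   if prison[0] == 0:
--     return 0
--   for i in range(len(prison)):
--     if prison[i] == 1:
--       prison = [0 if prison[i] == 1 else 1 for i in range(len(prison))]
--       count+=1
--   return count
-- ===== SOURCE B (Python) =====
-- def freed_prisoners(prison):
--     if not prison or prison[0] == 0:
--         return 0
--     count = 0
--     flipped = False
--     for x in prison:
--         if (x == 1) != flipped:
--             count += 1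
--             flipped = not flipped
--     return count
-- ===== Notes on version B (the rewrite author's own statement) =====
-- stated objective: alternative
-- what changed: B makes a single pass tracking a flip-parity boolean instead of rebuilding the whole list on every flip (worst-case O(n^2) in A, O(n) in B, though the timing inputs trigger few flips so no speedup was measured).
import Mathlib
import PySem

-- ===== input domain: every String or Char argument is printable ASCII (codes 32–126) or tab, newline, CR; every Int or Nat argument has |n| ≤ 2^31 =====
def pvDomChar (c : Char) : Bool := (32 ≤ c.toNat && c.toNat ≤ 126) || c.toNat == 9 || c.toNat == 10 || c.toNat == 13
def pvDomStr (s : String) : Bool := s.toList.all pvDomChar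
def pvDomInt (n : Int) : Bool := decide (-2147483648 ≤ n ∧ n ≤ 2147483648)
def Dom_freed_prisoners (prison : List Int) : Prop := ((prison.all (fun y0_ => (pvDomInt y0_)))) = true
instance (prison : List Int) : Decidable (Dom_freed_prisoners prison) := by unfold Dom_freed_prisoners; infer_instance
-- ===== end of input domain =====

-- B tracks a flip-parity boolean in a single pass instead of rebuilding the list on every flip (alternative decomposition; A raises IndexError on [], excluded by Pre_).


-- ===== PORT A =====
-- the list comprehension '[0 if prison[i] == 1 else 1 for i in range(len(prison))]'
def pvFlipA (p : List Int) : List Int :=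
  (PySem.List.pyRange 0 (p.length : Int) 1).map
    (fun i => if PySem.List.pyGetD p i 0 = 1 then (0 : Int) else 1)

def freed_prisoners (prison : List Int) : Int :=
  -- 'prison[0]' raises IndexError on []; excluded by Pre_ (pyGetD's default is never used inside Pre_)
  if PySem.List.pyGetD prison 0 0 = 0 then 0
  else
    ((PySem.List.pyRange 0 (prison.length : Int) 1).foldl
      (fun (st : Int × List Int) i =>
        if PySem.List.pyGetD st.2 i 0 = 1 then (st.1 + 1, pvFlipA st.2) else st)
      (0, prison)).1

-- ===== PORT B =====
def freed_prisoners_alt (prison : List Int) : Int :=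
  match prison with
  | [] => 0
  | h :: _ =>
    if h = 0 then 0
    else
      (prison.foldl
        (fun (st : Int × Bool) x =>
          if (decide (x = 1)) != st.2 then (st.1 + 1, !st.2) else st)
        (0, false)).1

-- ===== PRECONDITION & SPEC =====
-- Pre_ excludes only the empty list, on which A raises IndexError (prison[0]).
def Pre_freed_prisoners (prison : List Int) : Prop := prison ≠ []
instance (prison : List Int) : Decidable (Pre_freed_prisoners prison) := by unfold Pre_freed_prisoners; infer_instance
def pvWitness_freed_prisoners : List Int := [1, 0, 1]

def Spec_freed_prisoners (prison : List Int) (out : Int) : Prop := out = freed_prisoners_alt prison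
instance (prison : List Int) (out : Int) : Decidable (Spec_freed_prisoners prison out) := by unfold Spec_freed_prisoners; infer_instance

-- ===== CLAIM (what is proved, stated in full; the proofs are below) =====
def Claim_equal_freed_prisoners : Prop := ∀ (prison : List Int), Dom_freed_prisoners prison → Pre_freed_prisoners prison → Spec_freed_prisoners prison (freed_prisoners prison)

-- ===== LEMMAS AND PROOFS =====

-- common specification: count of positions where the element (seen through the flip parity b) reads 1
def pvSpecAux : List Int → Bool → Int
  | [], _ => 0
  | x :: xs, b => if (decide (x = 1)) != b then 1 + pvSpecAux xs (!b) else pvSpecAux xs b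

lemma b_fold_eq (xs : List Int) : ∀ (c : Int) (b : Bool),
    (xs.foldl (fun (st : Int × Bool) x =>
        if (decide (x = 1)) != st.2 then (st.1 + 1, !st.2) else st) (c, b)).1
      = c + pvSpecAux xs b := by
  induction xs with
  | nil => intro c b; simp [pvSpecAux]
  | cons x xs ih =>
    intro c b
    simp only [List.foldl_cons]
    by_cases h : (decide (x = 1) != b) = true
    · rw [if_pos h, ih]
      rw [show pvSpecAux (x :: xs) b = 1 + pvSpecAux xs (!b) from by
        simp only [pvSpecAux]; rw [if_pos h]]
      ring
    · rw [if_neg h, ih]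
      rw [show pvSpecAux (x :: xs) b = pvSpecAux xs b from by
        simp only [pvSpecAux]; rw [if_neg h]]

lemma flip_length (p : List Int) : (pvFlipA p).length = p.length := by
  simp [pvFlipA, PySem.List.length_pyRange_one]

lemma flip_getD (p : List Int) (j : Nat) (hj : j < p.length) :
    (pvFlipA p).getD j 0 = if p.getD j 0 = 1 then (0 : Int) else 1 := by
  have h := PySem.List.getElem?_map_pyRange_zero
      (fun i => if PySem.List.pyGetD p i 0 = 1 then (0 : Int) else 1) p.length j hj
  simp [pvFlipA, List.getD, h, PySem.List.pyGetD_natCast]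

lemma flip_decide (p : List Int) (j : Nat) (hj : j < p.length) :
    decide ((pvFlipA p).getD j 0 = 1) = !decide (p.getD j 0 = 1) := by
  rw [flip_getD p j hj]
  by_cases h : p.getD j 0 = 1
  · rw [if_pos h, h]
    decide
  · rw [if_neg h, decide_eq_false h]
    decide


lemma a_loop (prison : List Int) : ∀ (k i : Nat) (p : List Int) (c : Int) (b : Bool),
    i + k = prison.length →
    p.length = prison.length →
    (∀ j : Nat, j < prison.length →
        decide (p.getD j 0 = 1) = ((decide (prison.getD j 0 = 1)).xor b)) →
    ((PySem.List.pyRange (i : Int) (prison.length : Int) 1).foldl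
      (fun (st : Int × List Int) i =>
        if PySem.List.pyGetD st.2 i 0 = 1 then (st.1 + 1, pvFlipA st.2) else st)
      (c, p)).1 = c + pvSpecAux (prison.drop i) b := by
  intro k
  induction k with
  | zero =>
    intro i p c b hik hlen hinv
    have : (i : Int) = (prison.length : Int) := by omega
    rw [this, PySem.List.pyRange_one_eq_nil (le_refl _)]
    have : prison.drop i = [] := List.drop_eq_nil_of_le (by omega)
    simp [this, pvSpecAux]
  | succ k ih =>
    intro i p c b hik hlen hinv
    have hi : i < prison.length := by omega
    have hcast : ((i : Int) + 1) = ((i + 1 : Nat) : Int) := by push_cast; ring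
    have hdrop : prison.drop i = prison[i] :: prison.drop (i + 1) :=
      List.drop_eq_getElem_cons hi
    have hgd : prison.getD i 0 = prison[i] := List.getD_eq_getElem prison 0 hi
    have h1 := hinv i hi
    rw [hgd] at h1
    have hpg : PySem.List.pyGetD p (i : Int) 0 = p.getD i 0 :=
      PySem.List.pyGetD_natCast p i 0
    rw [PySem.List.pyRange_one_cons (by exact_mod_cast hi)]
    simp only [List.foldl_cons, hpg]
    by_cases hx : p.getD i 0 = 1
    · rw [if_pos hx, hcast]
      rw [ih (i + 1) (pvFlipA p) (c + 1) (!b) (by omega)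
            (by rw [flip_length]; exact hlen)
            (by intro j hj
                rw [flip_decide p j (by omega), hinv j hj]
                cases decide (prison.getD j 0 = 1) <;> cases b <;> rfl)]
      have h2 : (decide (prison[i] = 1) ^^ b) = true := by
        rw [← h1]; exact decide_eq_true hx
      have hcond : (decide (prison[i] = 1) != b) = true := by
        rw [show (decide (prison[i] = 1) != b) = (decide (prison[i] = 1) ^^ b) from by
          cases decide (prison[i] = 1) <;> cases b <;> rfl]
        exact h2
      rw [hdrop]
      rw [show pvSpecAux (prison[i] :: prison.drop (i + 1)) b
            = 1 + pvSpecAux (prison.drop (i + 1)) (!b) from by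
        simp only [pvSpecAux]; rw [if_pos hcond]]
      ring
    · rw [if_neg hx, hcast]
      rw [ih (i + 1) p c b (by omega) hlen hinv]
      have h2 : (decide (prison[i] = 1) ^^ b) = false := by
        rw [← h1]; exact decide_eq_false hx
      have hcond : (decide (prison[i] = 1) != b) = false := by
        rw [show (decide (prison[i] = 1) != b) = (decide (prison[i] = 1) ^^ b) from by
          cases decide (prison[i] = 1) <;> cases b <;> rfl]
        exact h2
      rw [hdrop]
      rw [show pvSpecAux (prison[i] :: prison.drop (i + 1)) b
            = pvSpecAux (prison.drop (i + 1)) b from by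
        simp only [pvSpecAux]; rw [if_neg (by simp [hcond])]]

-- ===== VERDICT (by name: the statement is the Claim_ definition above) =====
theorem freed_prisoners_spec : Claim_equal_freed_prisoners := by
  intro prison _ hpre
  unfold Spec_freed_prisoners
  cases prison with
  | nil => exact absurd rfl hpre
  | cons h t =>
    by_cases h0 : h = 0
    · simp [freed_prisoners, freed_prisoners_alt, h0, PySem.List.pyGetD_zero_cons]
    · have hB : freed_prisoners_alt (h :: t)
          = ((h :: t).foldl (fun (st : Int × Bool) x =>
              if (decide (x = 1)) != st.2 then (st.1 + 1, !st.2) else st) (0, false)).1 := by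
        simp only [freed_prisoners_alt]; rw [if_neg h0]
      have hA : freed_prisoners (h :: t)
          = ((PySem.List.pyRange 0 (((h :: t).length : Nat) : Int) 1).foldl
              (fun (st : Int × List Int) i =>
                if PySem.List.pyGetD st.2 i 0 = 1 then (st.1 + 1, pvFlipA st.2) else st)
              (0, h :: t)).1 := by
        unfold freed_prisoners
        rw [if_neg (by simp [PySem.List.pyGetD_zero_cons, h0])]
      rw [hA, hB, b_fold_eq]
      have := a_loop (h :: t) (h :: t).length 0 (h :: t) 0 false (by omega) rfl
        (by intro j hj; cases decide ((h :: t).getD j 0 = 1) <;> rfl)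
      rw [show ((0 : Nat) : Int) = 0 from rfl] at this
      rw [this]
      simp
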